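-- pv_equiv track=rewrite | github.com/pixian5/dt | crawler/watch_videos_vtech_with_progress.py | _parse_clock_text_to_seconds
-- ===== SOURCE A (Python) =====
-- def _parse_clock_text_to_seconds(text: str) -> int | None:
--     s = (text or "").strip()
--     if not s:
--         return None
--     parts = s.split(":")
--     try:
--         nums = [int(p) for p in parts]
--     except Exception:
--         return None
--
--     total = 0
--     for n in nums:
--         total = total * 60 + n
--     return total
-- ===== SOURCE B (Python) =====
-- def _parse_clock_text_to_seconds(text: str) -> int | None:
--     s = (text or "").strip()
--     if not s:
--         return None
--
--     def go(parts):
--         # recursively parse from the right: returns (value, weight) or None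
--         if not parts:
--             return (0, 1)
--         r = go(parts[1:])
--         if r is None:
--             return None
--         v, w = r
--         try:
--             n = int(parts[0])
--         except Exception:
--             return None
--         return (n * w + v, w * 60)
--
--     r = go(s.split(":"))
--     return None if r is None else r[0]
-- ===== Notes on version B (the rewrite author's own statement) =====
-- stated objective: alternative
-- what changed: Replaces A's two-stage pipeline (parse all fields into a list, then a left-to-right Horner accumulator loop) with a single recursive right-to-left pass that parses each field on the way and maintains a (value, positional weight) pair, with parse failure propagated as None instead of an exception handler around a list comprehension.
import Mathlib
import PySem

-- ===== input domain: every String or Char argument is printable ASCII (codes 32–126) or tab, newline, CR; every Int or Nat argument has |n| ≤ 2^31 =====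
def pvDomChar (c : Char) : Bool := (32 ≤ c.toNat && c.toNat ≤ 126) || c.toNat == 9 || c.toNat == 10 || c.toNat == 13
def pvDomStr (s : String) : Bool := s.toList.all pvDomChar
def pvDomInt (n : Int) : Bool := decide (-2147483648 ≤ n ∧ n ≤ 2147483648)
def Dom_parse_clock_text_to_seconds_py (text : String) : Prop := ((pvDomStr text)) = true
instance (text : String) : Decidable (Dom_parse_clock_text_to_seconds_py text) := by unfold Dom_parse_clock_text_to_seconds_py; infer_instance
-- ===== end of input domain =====

-- ===== PORT A =====
def hornerLoop (nums : List Int) : Int :=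
  nums.foldl (fun total n => total * 60 + n) 0

def parse_clock_text_to_seconds_py (text : String) : Option Int :=
  let s := PySem.Str.strip text    -- (text or "").strip(): for strings, `text or ""` = text unless empty
  if s = "" then none
  else
    let parts := (PySem.Str.split? s ":").getD []   -- s.split(":"); sep ":" is nonempty so split? is always some
    match parts.mapM PySem.Int.ofStr? with          -- [int(p) for p in parts]; any ValueError -> None
    | none => none
    | some nums => some (hornerLoop nums)

-- ===== PORT B =====
-- go(parts): recursive right-to-left parse; returns (value, weight) or None on an int() failure
def goParse : List String → Option (Int × Int)
  | [] => some (0, 1)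
  | p :: rest =>
    match goParse rest with
    | none => none
    | some (v, w) =>
      match PySem.Int.ofStr? p with
      | none => none
      | some n => some (n * w + v, w * 60)

def parse_clock_text_to_seconds_py_alt (text : String) : Option Int :=
  let s := PySem.Str.strip text
  if s = "" then none
  else
    match goParse ((PySem.Str.split? s ":").getD []) with
    | none => none
    | some r => some r.1

-- ===== PRECONDITION & SPEC =====
def Spec_parse_clock_text_to_seconds_py (text : String) (out : Option Int) : Prop := out = parse_clock_text_to_seconds_py_alt text
instance (text : String) (out : Option Int) : Decidable (Spec_parse_clock_text_to_seconds_py text out) := by unfold Spec_parse_clock_text_to_seconds_py; infer_instance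

-- ===== CLAIM (what is proved, stated in full; the proofs are below) =====
def Claim_equal_parse_clock_text_to_seconds_py : Prop := ∀ (text : String), Dom_parse_clock_text_to_seconds_py text → Spec_parse_clock_text_to_seconds_py text (parse_clock_text_to_seconds_py text)

-- ===== LEMMAS AND PROOFS =====
-- Shifting the Horner accumulator: foldl from acc = acc * 60^len + foldl from 0.
theorem horner_shift (nums : List Int) (acc : Int) :
    nums.foldl (fun total n => total * 60 + n) acc
      = acc * 60 ^ nums.length + nums.foldl (fun total n => total * 60 + n) 0 := by
  induction nums generalizing acc with
  | nil => simp
  | cons n rest ih =>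
    rw [List.foldl_cons, List.foldl_cons, ih (acc * 60 + n), ih ((0 : Int) * 60 + n),
      List.length_cons]
    ring

-- The recursive right-to-left parser computes exactly (Horner value, 60^length) of the parsed list.
theorem goParse_eq (parts : List String) :
    goParse parts
      = (parts.mapM PySem.Int.ofStr?).map (fun nums => (hornerLoop nums, 60 ^ nums.length)) := by
  induction parts with
  | nil => rfl
  | cons p rest ih =>
    simp only [goParse, ih, List.mapM_cons]
    cases hn : PySem.Int.ofStr? p with
    | none => cases hr : rest.mapM PySem.Int.ofStr? <;> simp
    | some n =>
      cases hr : rest.mapM PySem.Int.ofStr? with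
      | none => simp
      | some nums =>
        have hh : hornerLoop (n :: nums) = n * 60 ^ nums.length + hornerLoop nums := by
          unfold hornerLoop
          rw [List.foldl_cons, horner_shift nums ((0 : Int) * 60 + n)]
          ring
        simp [hh, pow_succ]

-- ===== VERDICT (by name: the statement is the Claim_ definition above) =====
theorem parse_clock_text_to_seconds_py_spec : Claim_equal_parse_clock_text_to_seconds_py := by
  intro text _
  unfold Spec_parse_clock_text_to_seconds_py parse_clock_text_to_seconds_py parse_clock_text_to_seconds_py_alt
  simp only []
  split
  · rfl
  · rw [goParse_eq]
    cases h : (((PySem.Str.split? (PySem.Str.strip text) ":").getD []).mapM PySem.Int.ofStr?) <;> simp
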